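-- pv_equiv track=rewrite | github.com/Aaron-Cue/algoritmos-3 | Tp's/TP01/codigo02.py | calcular_posicion_correcta
-- ===== SOURCE A (Python) =====
-- def calcular_posicion_correcta(sec):
--   posicion_correcta = 0
--   for movimiento in sec:
--     if movimiento == '+':
--       posicion_correcta += 1
--     else:
--       posicion_correcta -= 1
--   return posicion_correcta
-- ===== SOURCE B (Python) =====
-- def calcular_posicion_correcta(sec):
--   # closed form: each '+' contributes +1, every other element -1
--   return 2 * list(sec).count('+') - len(sec)
-- ===== Notes on version B (the rewrite author's own statement) =====
-- stated objective: idiomatic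
-- what changed: Replaced the explicit accumulator loop with the closed form 2*count('+') - len(sec), eliminating the loop and branch.
import Mathlib
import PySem

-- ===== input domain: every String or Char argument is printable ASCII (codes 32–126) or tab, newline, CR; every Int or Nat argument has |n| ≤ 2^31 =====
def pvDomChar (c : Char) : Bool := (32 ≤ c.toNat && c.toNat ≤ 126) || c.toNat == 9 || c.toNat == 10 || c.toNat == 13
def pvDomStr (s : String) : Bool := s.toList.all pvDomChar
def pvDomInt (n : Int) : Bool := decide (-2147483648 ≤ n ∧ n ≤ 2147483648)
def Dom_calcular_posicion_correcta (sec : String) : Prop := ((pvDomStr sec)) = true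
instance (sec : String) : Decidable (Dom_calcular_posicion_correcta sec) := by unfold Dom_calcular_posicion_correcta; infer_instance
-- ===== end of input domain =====

-- B replaces A's accumulator loop by the closed form 2*count('+') - len(sec); same O(n) cost, idiomatic.


-- ===== PORT A =====
def calcular_posicion_correcta (sec : String) : Int :=
  sec.toList.foldl (fun posicion_correcta movimiento =>
    if movimiento == '+' then posicion_correcta + 1 else posicion_correcta - 1) 0

-- ===== PORT B =====
def calcular_posicion_correcta_alt (sec : String) : Int :=
  2 * (PySem.List.count sec.toList '+' : Int) - (PySem.Str.len sec : Int)

-- ===== PRECONDITION & SPEC =====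
def Spec_calcular_posicion_correcta (sec : String) (out : Int) : Prop := out = calcular_posicion_correcta_alt sec
instance (sec : String) (out : Int) : Decidable (Spec_calcular_posicion_correcta sec out) := by unfold Spec_calcular_posicion_correcta; infer_instance

-- ===== CLAIM (what is proved, stated in full; the proofs are below) =====
def Claim_equal_calcular_posicion_correcta : Prop := ∀ (sec : String), Dom_calcular_posicion_correcta sec → Spec_calcular_posicion_correcta sec (calcular_posicion_correcta sec)

-- ===== LEMMAS AND PROOFS =====

-- ===== VERDICT (by name: the statement is the Claim_ definition above) =====
theorem pv_fold_count (l : List Char) (a : Int) :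
    l.foldl (fun posicion_correcta movimiento =>
      if movimiento == '+' then posicion_correcta + 1 else posicion_correcta - 1) a
      = a + 2 * (l.count '+' : Int) - (l.length : Int) := by
  induction l generalizing a with
  | nil => simp
  | cons c t ih =>
    simp only [List.foldl_cons, ih, List.count_cons, List.length_cons]
    by_cases h : c = '+' <;> simp [h] <;> ring

theorem calcular_posicion_correcta_spec : Claim_equal_calcular_posicion_correcta := by
  intro sec _
  unfold Spec_calcular_posicion_correcta calcular_posicion_correcta calcular_posicion_correcta_alt
  rw [PySem.List.count_eq, PySem.Str.len_eq, pv_fold_count]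
  ring
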